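-- pv_equiv track=rewrite | github.com/CodCodingCode/AMIE-app | new_data_gen/actual_data_gen/gen_convo.py | clean_diagnosis_output
-- ===== SOURCE A (Python) =====
-- def clean_diagnosis_output(raw_output):
--     """Clean diagnosis output to only include THINKING and ANSWER sections"""
--     lines = raw_output.split("\n")
--     cleaned_lines = []
--     in_valid_section = False
--
--     for line in lines:
--         line_stripped = line.strip()
--
--         # Check if we're starting THINKING or ANSWER section
--         if line_stripped.startswith("THINKING:") or line_stripped.startswith("ANSWER:"):
--             in_valid_section = True
--             cleaned_lines.append(line)
--         # Stop at unwanted content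
--         elif (
--             line_stripped.startswith("**Note:")
--             or line_stripped.startswith("Note:")
--             or line_stripped.startswith("**Additional:")
--             or line_stripped.startswith("Additional:")
--             or line_stripped.startswith("**Further:")
--             or line_stripped.startswith("Further:")
--             or line_stripped.startswith("**Recommendation:")
--             or line_stripped.startswith("Recommendation:")
--         ):
--             break
--         # Continue adding lines if we're in a valid section
--         elif in_valid_section:
--             cleaned_lines.append(line)
--
--     return "\n".join(cleaned_lines).strip()
-- ===== SOURCE B (Python) =====
-- STOPS = ("**Note:", "Note:", "**Additional:", "Additional:",
--          "**Further:", "Further:", "**Recommendation:", "Recommendation:")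
-- HEADERS = ("THINKING:", "ANSWER:")
--
--
-- def clean_diagnosis_output(raw_output):
--     """Clean diagnosis output to only include THINKING and ANSWER sections."""
--     lines = raw_output.split("\n")
--     # pass 1: cut off everything from the first stop-marker line onward
--     cut = next((i for i, l in enumerate(lines) if l.strip().startswith(STOPS)),
--                len(lines))
--     head = lines[:cut]
--     # pass 2: keep everything from the first section header onward
--     start = next((i for i, l in enumerate(head) if l.strip().startswith(HEADERS)),
--                  None)
--     if start is None:
--         return ""
--     return "\n".join(head[start:]).strip()
-- ===== Notes on version B (the rewrite author's own statement) =====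
-- stated objective: alternative
-- what changed: Replaces the single fused flag-and-break loop by two independent index computations: first the cutoff index of the first stop-marker line (list sliced up to it), then the index of the first THINKING:/ANSWER: header, returning the joined tail slice from that header; no accumulator or in-section flag is maintained.
import Mathlib
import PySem

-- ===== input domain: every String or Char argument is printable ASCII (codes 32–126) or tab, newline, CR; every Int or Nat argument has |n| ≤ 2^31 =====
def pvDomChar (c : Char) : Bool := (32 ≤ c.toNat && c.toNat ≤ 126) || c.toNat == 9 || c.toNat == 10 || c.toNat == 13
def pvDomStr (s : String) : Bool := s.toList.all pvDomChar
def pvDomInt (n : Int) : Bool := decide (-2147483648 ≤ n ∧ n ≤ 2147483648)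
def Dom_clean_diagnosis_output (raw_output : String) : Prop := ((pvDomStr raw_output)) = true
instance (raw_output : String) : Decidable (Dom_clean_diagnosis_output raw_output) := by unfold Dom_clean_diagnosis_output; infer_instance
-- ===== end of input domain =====

-- B replaces A's fused flag-and-break loop by two index computations (cutoff at the
-- first stop marker, start at the first header) and one slice; same cost (alternative).

-- ===== PORT A =====
-- the for-loop of A: state = (accumulated lines, in_valid_section flag), break returns acc
def cdoLoopA (lines : List String) (acc : List String) (flag : Bool) : List String :=
  match lines with
  | [] => acc
  | line :: rest =>
    let ls := PySem.Str.strip line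
    if PySem.Str.startswith ls "THINKING:" || PySem.Str.startswith ls "ANSWER:" then
      cdoLoopA rest (acc ++ [line]) true
    else if PySem.Str.startswith ls "**Note:" || PySem.Str.startswith ls "Note:"
         || PySem.Str.startswith ls "**Additional:" || PySem.Str.startswith ls "Additional:"
         || PySem.Str.startswith ls "**Further:" || PySem.Str.startswith ls "Further:"
         || PySem.Str.startswith ls "**Recommendation:" || PySem.Str.startswith ls "Recommendation:" then
      acc
    else if flag then cdoLoopA rest (acc ++ [line]) flag
    else cdoLoopA rest acc flag

def clean_diagnosis_output (raw_output : String) : String :=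
  -- raw_output.split("\n"): sep ≠ "" so split? is `some`
  PySem.Str.strip (PySem.Str.join "\n"
    (cdoLoopA ((PySem.Str.split? raw_output "\n").getD []) [] false))

-- ===== PORT B =====
def bStops : List String :=
  ["**Note:", "Note:", "**Additional:", "Additional:",
   "**Further:", "Further:", "**Recommendation:", "Recommendation:"]

def bIsStop (l : String) : Bool := bStops.any (fun p => PySem.Str.startswith (PySem.Str.strip l) p)

def bIsHeader (l : String) : Bool :=
  PySem.Str.startswith (PySem.Str.strip l) "THINKING:"
  || PySem.Str.startswith (PySem.Str.strip l) "ANSWER:"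

-- lines[:cut] where cut = index of the first stop-marker line (all lines if none)
def bHead (lines : List String) : List String :=
  match List.findIdx? bIsStop lines with
  | none => lines
  | some i => List.take i lines

def clean_diagnosis_output_alt (raw_output : String) : String :=
  match List.findIdx? bIsHeader (bHead ((PySem.Str.split? raw_output "\n").getD [])) with
  | none => ""
  | some i =>
      PySem.Str.strip (PySem.Str.join "\n"
        (List.drop i (bHead ((PySem.Str.split? raw_output "\n").getD []))))

-- ===== PRECONDITION & SPEC =====
def Spec_clean_diagnosis_output (raw_output : String) (out : String) : Prop := out = clean_diagnosis_output_alt raw_output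
instance (raw_output : String) (out : String) : Decidable (Spec_clean_diagnosis_output raw_output out) := by unfold Spec_clean_diagnosis_output; infer_instance

-- ===== CLAIM (what is proved, stated in full; the proofs are below) =====
def Claim_equal_clean_diagnosis_output : Prop := ∀ (raw_output : String), Dom_clean_diagnosis_output raw_output → Spec_clean_diagnosis_output raw_output (clean_diagnosis_output raw_output)

-- ===== LEMMAS AND PROOFS =====

-- A's inline or-chain is bIsStop
lemma chain_eq_bIsStop (line : String) :
    (PySem.Str.startswith (PySem.Str.strip line) "**Note:" || PySem.Str.startswith (PySem.Str.strip line) "Note:"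
     || PySem.Str.startswith (PySem.Str.strip line) "**Additional:" || PySem.Str.startswith (PySem.Str.strip line) "Additional:"
     || PySem.Str.startswith (PySem.Str.strip line) "**Further:" || PySem.Str.startswith (PySem.Str.strip line) "Further:"
     || PySem.Str.startswith (PySem.Str.strip line) "**Recommendation:" || PySem.Str.startswith (PySem.Str.strip line) "Recommendation:")
    = bIsStop line := by
  simp [bIsStop, bStops, Bool.or_assoc]

-- two prefixes of the same list are comparable; no header prefix is comparable
-- with any stop prefix, so a header line is never a stop line
set_option maxRecDepth 8000 in
lemma header_not_stop (l : String) (h : bIsHeader l = true) : bIsStop l = false := by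
  by_contra hs
  rw [Bool.not_eq_false] at hs
  simp only [bIsHeader, Bool.or_eq_true, PySem.Str.startswith_eq, PySem.Chars.startswith_iff] at h
  simp only [bIsStop, bStops, List.any_cons, List.any_nil, Bool.or_eq_true, Bool.false_eq_true,
    or_false, PySem.Str.startswith_eq, PySem.Chars.startswith_iff] at hs
  rcases h with h | h <;> rcases hs with hs | hs | hs | hs | hs | hs | hs | hs <;>
    rcases List.prefix_or_prefix_of_prefix h hs with hc | hc <;> revert hc <;> decide

lemma tw_none {α : Type} (p : α → Bool) (xs : List α) (h : List.findIdx? p xs = none) :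
    xs.takeWhile (fun x => !p x) = xs := by
  induction xs with
  | nil => rfl
  | cons x xs ih =>
    rw [List.findIdx?_cons] at h
    by_cases hx : p x = true
    · simp [hx] at h
    · have hx' : p x = false := by simpa using hx
      simp only [hx', Bool.false_eq_true, if_false, Option.map_eq_none_iff] at h
      simp [hx', ih h]

lemma tw_some {α : Type} (p : α → Bool) (xs : List α) (i : Nat)
    (h : List.findIdx? p xs = some i) :
    xs.takeWhile (fun x => !p x) = xs.take i := by
  induction xs generalizing i with
  | nil => simp at h
  | cons x xs ih =>
    rw [List.findIdx?_cons] at h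
    by_cases hx : p x = true
    · rw [if_pos hx] at h
      obtain rfl : (0 : Nat) = i := by simpa using h
      simp [hx]
    · have hx' : p x = false := by simpa using hx
      rw [if_neg hx] at h
      obtain ⟨j, hj, rfl⟩ := Option.map_eq_some_iff.mp h
      simp [hx', ih j hj, List.take_succ_cons]

lemma loopA_true (lines : List String) (acc : List String) :
    cdoLoopA lines acc true = acc ++ lines.takeWhile (fun l => !bIsStop l) := by
  induction lines generalizing acc with
  | nil => simp [cdoLoopA]
  | cons l ls ih =>
    rw [cdoLoopA]
    by_cases hh : (PySem.Str.startswith (PySem.Str.strip l) "THINKING:"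
        || PySem.Str.startswith (PySem.Str.strip l) "ANSWER:") = true
    · have hns : bIsStop l = false := header_not_stop l (by simpa [bIsHeader] using hh)
      rw [if_pos hh, ih]
      simp [hns]
    · simp only [Bool.not_eq_true] at hh
      rw [if_neg (by rw [hh]; simp)]
      by_cases hst : bIsStop l = true
      · rw [if_pos (by rw [chain_eq_bIsStop]; exact hst)]
        simp [hst]
      · have hst' : bIsStop l = false := by simpa using hst
        rw [if_neg (by rw [chain_eq_bIsStop]; simp [hst'])]
        rw [if_pos rfl, ih]
        simp [hst']

lemma loopA_false (lines : List String) :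
    cdoLoopA lines [] false =
      (match List.findIdx? bIsHeader (lines.takeWhile (fun l => !bIsStop l)) with
       | none => []
       | some i => List.drop i (lines.takeWhile (fun l => !bIsStop l))) := by
  induction lines with
  | nil => rfl
  | cons l ls ih =>
    rw [cdoLoopA]
    by_cases hh : (PySem.Str.startswith (PySem.Str.strip l) "THINKING:"
        || PySem.Str.startswith (PySem.Str.strip l) "ANSWER:") = true
    · have hhd : bIsHeader l = true := by simpa [bIsHeader] using hh
      have hns : bIsStop l = false := header_not_stop l hhd
      rw [if_pos hh, loopA_true]
      simp [hns, List.findIdx?_cons, hhd]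
    · simp only [Bool.not_eq_true] at hh
      have hhd : bIsHeader l = false := hh
      rw [if_neg (by rw [hh]; simp)]
      by_cases hst : bIsStop l = true
      · rw [if_pos (by rw [chain_eq_bIsStop]; exact hst)]
        simp [hst]
      · have hst' : bIsStop l = false := by simpa using hst
        rw [if_neg (by rw [chain_eq_bIsStop]; simp [hst'])]
        rw [if_neg (by simp), ih]
        simp only [List.takeWhile_cons, hst', Bool.not_false, if_pos, List.findIdx?_cons, hhd,
          Bool.false_eq_true, if_false]
        cases hfi : List.findIdx? bIsHeader (ls.takeWhile (fun l => !bIsStop l)) <;>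
          simp [List.drop_succ_cons]

-- ===== VERDICT (by name: the statement is the Claim_ definition above) =====
theorem clean_diagnosis_output_spec : Claim_equal_clean_diagnosis_output := by
  intro raw _
  unfold Spec_clean_diagnosis_output clean_diagnosis_output clean_diagnosis_output_alt
  generalize (PySem.Str.split? raw "\n").getD [] = L
  have hhead : bHead L = L.takeWhile (fun l => !bIsStop l) := by
    unfold bHead
    cases hS : List.findIdx? bIsStop L
    · simp [tw_none _ _ hS]
    · simp [tw_some _ _ _ hS]
  rw [loopA_false, hhead]
  generalize List.findIdx? bIsHeader (L.takeWhile (fun l => !bIsStop l)) = o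
  cases o with
  | none =>
      show PySem.Str.strip (PySem.Str.join "\n" []) = ""
      decide
  | some i => rfl
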